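-- pv_equiv track=rewrite | github.com/joaotovolli/Sustainacore | app/retrieval/quality_guards.py | infer_source_type_filters
-- ===== SOURCE A (Python) =====
-- from typing import Any, Dict, Iterable, List, Optional, Sequence, Tuple
--
-- def infer_source_type_filters(question: str) -> Optional[List[str]]:
--     """Return a conservative SOURCE_TYPE filter hint for Oracle retrieval."""
--
--     q = (question or "").lower().strip()
--     if not q:
--         return None
--
--     if any(tok in q for tok in ("ai act", "regulation", "jurisdiction", "milestone", "instrument snapshots")):
--         return ["regulatory"]
--
--     if any(tok in q for tok in ("news", "press", "release", "headline")):
--         return ["news_release"]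
--
--     if any(tok in q for tok in ("performance", "returns", "return", "drawdown", "volatility")):
--         return ["performance"]
--
--     # Generic company questions: bias toward company pages instead of large regulatory corpora.
--     if any(tok in q for tok in ("tell me about", "what does", "who is", "company", "ticker")):
--         return ["company_profile"]
--
--     return None
-- ===== SOURCE B (Python) =====
-- GROUPS = (
--     ("ai act", "regulation", "jurisdiction", "milestone", "instrument snapshots"),
--     ("news", "press", "release", "headline"),
--     ("performance", "returns", "return", "drawdown", "volatility"),
--     ("tell me about", "what does", "who is", "company", "ticker"),
-- )
-- LABELS = ("regulatory", "news_release", "performance", "company_profile")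
-- TOKENS = [(tok, i) for i, grp in enumerate(GROUPS) for tok in grp]
--
--
-- def infer_source_type_filters(question):
--     """Return a conservative SOURCE_TYPE filter hint for Oracle retrieval."""
--     q = (question or "").lower().strip()
--     if not q:
--         return None
--     hits = [i for tok, i in TOKENS if tok in q]
--     if not hits:
--         return None
--     return [LABELS[min(hits)]]
-- ===== Notes on version B (the rewrite author's own statement) =====
-- stated objective: alternative
-- what changed: A short-circuits through four sequential if/any branches; B makes one pass over a flat token table collecting every matching token's group index and returns the label of the minimum index (first-match order falls out of the global minimum, not of branch order).
import Mathlib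
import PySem

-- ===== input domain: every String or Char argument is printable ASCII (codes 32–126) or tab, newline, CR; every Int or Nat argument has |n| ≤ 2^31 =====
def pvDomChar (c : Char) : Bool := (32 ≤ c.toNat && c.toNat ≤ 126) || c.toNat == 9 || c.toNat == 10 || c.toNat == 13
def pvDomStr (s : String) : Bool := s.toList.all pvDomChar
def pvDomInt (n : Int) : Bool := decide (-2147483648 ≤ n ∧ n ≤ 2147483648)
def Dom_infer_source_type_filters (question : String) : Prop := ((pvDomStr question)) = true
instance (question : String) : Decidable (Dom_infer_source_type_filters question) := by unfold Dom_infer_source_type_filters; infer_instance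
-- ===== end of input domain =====

-- B replaces A's sequential short-circuit branches by one pass over a flat token table that
-- collects every matching token's group index and returns the label of the minimum index (alternative decomposition).

-- ===== PORT A =====
def infer_source_type_filters (question : String) : Option (List String) :=
  let q := PySem.Str.strip (PySem.Str.lower question)
  if q = "" then none
  else if ["ai act", "regulation", "jurisdiction", "milestone", "instrument snapshots"].any
            (fun tok => PySem.Str.isIn tok q) then some ["regulatory"]
  else if ["news", "press", "release", "headline"].any
            (fun tok => PySem.Str.isIn tok q) then some ["news_release"]
  else if ["performance", "returns", "return", "drawdown", "volatility"].any
            (fun tok => PySem.Str.isIn tok q) then some ["performance"]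
  else if ["tell me about", "what does", "who is", "company", "ticker"].any
            (fun tok => PySem.Str.isIn tok q) then some ["company_profile"]
  else none

-- ===== PORT B =====
def pvGroups : List (List String) :=
  [ ["ai act", "regulation", "jurisdiction", "milestone", "instrument snapshots"],
    ["news", "press", "release", "headline"],
    ["performance", "returns", "return", "drawdown", "volatility"],
    ["tell me about", "what does", "who is", "company", "ticker"] ]

def pvLabels : List String := ["regulatory", "news_release", "performance", "company_profile"]

-- TOKENS = [(tok, i) for i, grp in enumerate(GROUPS) for tok in grp]
def pvTokens : List (String × Int) :=
  (PySem.List.enumerate pvGroups 0).flatMap (fun p => p.2.map (fun tok => (tok, p.1)))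

def infer_source_type_filters_alt (question : String) : Option (List String) :=
  let q := PySem.Str.strip (PySem.Str.lower question)
  if q = "" then none
  else
    let hits := pvTokens.filterMap (fun p => if PySem.Str.isIn p.1 q then some p.2 else none)
    match PySem.List.min? hits (fun x => x) with
    | none => none
    | some m => (PySem.List.pyGet? pvLabels m).map (fun l => [l])

-- ===== PRECONDITION & SPEC =====
def Spec_infer_source_type_filters (question : String) (out : Option (List String)) : Prop := out = infer_source_type_filters_alt question
instance (question : String) (out : Option (List String)) : Decidable (Spec_infer_source_type_filters question out) := by unfold Spec_infer_source_type_filters; infer_instance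

-- ===== CLAIM (what is proved, stated in full; the proofs are below) =====
def Claim_equal_infer_source_type_filters : Prop := ∀ (question : String), Dom_infer_source_type_filters question → Spec_infer_source_type_filters question (infer_source_type_filters question)

-- ===== LEMMAS AND PROOFS =====

-- hits of one token group: filterMap over (map (·, i)) = filterMap of the if over the tokens
theorem pvGroupHits (q : String) (i : Int) (ts : List String) :
    (ts.map (fun tok => (tok, i))).filterMap
        (fun p => if PySem.Str.isIn p.1 q then some p.2 else none)
      = ts.filterMap (fun tok => if PySem.Str.isIn tok q then some i else none) := by
  induction ts with
  | nil => rfl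
  | cons h t ih => simp only [List.map_cons, List.filterMap_cons, ih]

theorem pvGroupHits_mem (q : String) (i : Int) (ts : List String) (x : Int)
    (hx : x ∈ ts.filterMap (fun tok => if PySem.Str.isIn tok q then some i else none)) : x = i := by
  rcases List.mem_filterMap.mp hx with ⟨tok, -, h⟩
  split at h
  · exact (Option.some.inj h).symm
  · exact absurd h (by simp)

theorem pvGroupHits_nil_iff (q : String) (i : Int) (ts : List String) :
    ts.filterMap (fun tok => if PySem.Str.isIn tok q then some i else none) = []
      ↔ ts.any (fun tok => PySem.Str.isIn tok q) = false := by
  rw [List.filterMap_eq_nil_iff, List.any_eq_false]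
  constructor
  · intro h tok htok hc
    have h2 := h tok htok
    rw [if_pos hc] at h2
    exact Option.some_ne_none i h2
  · intro h tok htok
    rw [if_neg (h tok htok)]

-- min of a block of i's followed by larger indices
theorem pvMin_prefix (i : Int) (l1 l2 : List Int)
    (h1 : ∀ x ∈ l1, x = i) (h2 : ∀ x ∈ l2, i ≤ x) (hne : l1 ≠ []) :
    PySem.List.min? (l1 ++ l2) (fun x => x) = some i := by
  cases hm : PySem.List.min? (l1 ++ l2) (fun x => x) with
  | none =>
      rw [PySem.List.min?_eq_none_iff] at hm
      exact absurd (List.append_eq_nil_iff.mp hm).1 hne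
  | some m =>
      have hmem : m ∈ l1 ++ l2 := PySem.List.min?_mem hm
      have hmin : ∀ y ∈ l1 ++ l2, m ≤ y := by
        intro y hy; exact PySem.List.min?_isMin hm y hy
      have him : i ≤ m := by
        rcases List.mem_append.mp hmem with h | h
        · exact le_of_eq (h1 m h).symm
        · exact h2 m h
      obtain ⟨a, ha⟩ := List.exists_mem_of_ne_nil l1 hne
      have hia : m ≤ i := by
        have := hmin a (List.mem_append_left _ ha)
        rwa [h1 a ha] at this
      rw [le_antisymm hia him]

-- ===== VERDICT (by name: the statement is the Claim_ definition above) =====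
theorem infer_source_type_filters_spec : Claim_equal_infer_source_type_filters := by
  intro question _
  unfold Spec_infer_source_type_filters infer_source_type_filters infer_source_type_filters_alt
  set q := PySem.Str.strip (PySem.Str.lower question) with hq
  by_cases h0 : q = ""
  · simp [h0]
  · simp only [if_neg h0]
    -- the flat token table is the four groups in order
    have htok : pvTokens =
        ((["ai act", "regulation", "jurisdiction", "milestone", "instrument snapshots"].map
            (fun tok => (tok, (0 : Int)))) ++
         (["news", "press", "release", "headline"].map (fun tok => (tok, (1 : Int)))) ++
         (["performance", "returns", "return", "drawdown", "volatility"].map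
            (fun tok => (tok, (2 : Int)))) ++
         (["tell me about", "what does", "who is", "company", "ticker"].map
            (fun tok => (tok, (3 : Int))))) := by decide
    set f : String × Int → Option Int := fun p => if PySem.Str.isIn p.1 q then some p.2 else none with hf
    set g : Int → String → Option Int := fun i tok => if PySem.Str.isIn tok q then some i else none with hg
    set c0 := ["ai act", "regulation", "jurisdiction", "milestone", "instrument snapshots"].filterMap (g 0) with hc0
    set c1 := ["news", "press", "release", "headline"].filterMap (g 1) with hc1
    set c2 := ["performance", "returns", "return", "drawdown", "volatility"].filterMap (g 2) with hc2
    set c3 := ["tell me about", "what does", "who is", "company", "ticker"].filterMap (g 3) with hc3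
    have hhits : pvTokens.filterMap f = c0 ++ (c1 ++ (c2 ++ c3)) := by
      rw [htok, List.filterMap_append, List.filterMap_append, List.filterMap_append, hf,
        pvGroupHits, pvGroupHits, pvGroupHits, pvGroupHits, List.append_assoc, List.append_assoc]
    rw [hhits]
    -- membership bounds for the four blocks
    have m0 : ∀ x ∈ c0, x = (0 : Int) := fun x hx => pvGroupHits_mem q 0 _ x (hc0 ▸ hx)
    have m1 : ∀ x ∈ c1, x = (1 : Int) := fun x hx => pvGroupHits_mem q 1 _ x (hc1 ▸ hx)
    have m2 : ∀ x ∈ c2, x = (2 : Int) := fun x hx => pvGroupHits_mem q 2 _ x (hc2 ▸ hx)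
    have m3 : ∀ x ∈ c3, x = (3 : Int) := fun x hx => pvGroupHits_mem q 3 _ x (hc3 ▸ hx)
    by_cases b0 : ["ai act", "regulation", "jurisdiction", "milestone", "instrument snapshots"].any
        (fun tok => PySem.Str.isIn tok q) = true
    · rw [if_pos b0]
      have hne : c0 ≠ [] := by
        intro h
        rw [hc0, pvGroupHits_nil_iff] at h
        rw [b0] at h; exact Bool.true_eq_false.mp h
      rw [pvMin_prefix 0 c0 (c1 ++ (c2 ++ c3)) m0 ?_ hne]
      · decide
      · intro x hx
        rcases List.mem_append.mp hx with h | h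
        · rw [m1 x h]; omega
        rcases List.mem_append.mp h with h | h
        · rw [m2 x h]; omega
        · rw [m3 x h]; omega
    · rw [if_neg b0]
      have hz0 : c0 = [] := by
        rw [hc0, pvGroupHits_nil_iff]
        exact Bool.not_eq_true _ ▸ (Bool.eq_false_iff.mpr (fun h => b0 h))
      rw [hz0, List.nil_append]
      by_cases b1 : ["news", "press", "release", "headline"].any
          (fun tok => PySem.Str.isIn tok q) = true
      · rw [if_pos b1]
        have hne : c1 ≠ [] := by
          intro h
          rw [hc1, pvGroupHits_nil_iff] at h
          rw [b1] at h; exact Bool.true_eq_false.mp h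
        rw [pvMin_prefix 1 c1 (c2 ++ c3) m1 ?_ hne]
        · decide
        · intro x hx
          rcases List.mem_append.mp hx with h | h
          · rw [m2 x h]; omega
          · rw [m3 x h]; omega
      · rw [if_neg b1]
        have hz1 : c1 = [] := by
          rw [hc1, pvGroupHits_nil_iff]
          exact Bool.not_eq_true _ ▸ (Bool.eq_false_iff.mpr (fun h => b1 h))
        rw [hz1, List.nil_append]
        by_cases b2 : ["performance", "returns", "return", "drawdown", "volatility"].any
            (fun tok => PySem.Str.isIn tok q) = true
        · rw [if_pos b2]
          have hne : c2 ≠ [] := by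
            intro h
            rw [hc2, pvGroupHits_nil_iff] at h
            rw [b2] at h; exact Bool.true_eq_false.mp h
          rw [pvMin_prefix 2 c2 c3 m2 (fun x hx => by rw [m3 x hx]; omega) hne]
          decide
        · rw [if_neg b2]
          have hz2 : c2 = [] := by
            rw [hc2, pvGroupHits_nil_iff]
            exact Bool.not_eq_true _ ▸ (Bool.eq_false_iff.mpr (fun h => b2 h))
          rw [hz2, List.nil_append]
          by_cases b3 : ["tell me about", "what does", "who is", "company", "ticker"].any
              (fun tok => PySem.Str.isIn tok q) = true
          · rw [if_pos b3]
            have hne : c3 ≠ [] := by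
              intro h
              rw [hc3, pvGroupHits_nil_iff] at h
              rw [b3] at h; exact Bool.true_eq_false.mp h
            rw [← List.append_nil c3, pvMin_prefix 3 c3 [] m3 (by simp) hne]
            decide
          · rw [if_neg b3]
            have hz3 : c3 = [] := by
              rw [hc3, pvGroupHits_nil_iff]
              exact Bool.not_eq_true _ ▸ (Bool.eq_false_iff.mpr (fun h => b3 h))
            rw [hz3]
            rfl
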